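-- pv_equiv track=rewrite | github.com/scobbe/flashcards | lib/output/schema_utils.py | _field_name_to_key
-- ===== SOURCE A (Python) =====
-- def _field_name_to_key(name: str) -> str:
--     """Convert field name to JSON key format."""
--     key = name.lower()
--     # Remove parenthetical placeholders
--     while True:
--         start = key.find("(")
--         end = key.find(")", start + 1)
--         if start != -1 and end != -1:
--             key = key[:start] + key[end + 1:]
--         else:
--             break
--     key = key.replace(" ", "_").replace("-", "_")
--     key = key.replace("__", "_").strip(" _")
--     return key
-- ===== SOURCE B (Python) =====
-- def _field_name_to_key(name: str) -> str:
--     # One left-to-right pass: buffer chars from an opening parenthesis until the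
--     # next closing one (discarding the group), flushing an unclosed buffer at the end.
--     out = []
--     buf = None
--     for ch in name.lower():
--         if buf is None:
--             if ch == '(':
--                 buf = [ch]
--             else:
--                 out.append(ch)
--         elif ch == ')':
--             buf = None
--         else:
--             buf.append(ch)
--     if buf is not None:
--         out.extend(buf)
--     key = ''.join(out)
--     key = key.replace(' ', '_').replace('-', '_')
--     key = key.replace('__', '_').strip(' _')
--     return key
-- ===== Notes on version B (the rewrite author's own statement) =====
-- stated objective: alternative
-- what changed: The repeated find-and-slice while-loop that rebuilds the string once per parenthetical group is replaced by a single left-to-right pass with a pending buffer (characters after an opening parenthesis are buffered until the next closing one, the group discarded, an unclosed buffer flushed at the end); the replace/strip tail is unchanged.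
import Mathlib
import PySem

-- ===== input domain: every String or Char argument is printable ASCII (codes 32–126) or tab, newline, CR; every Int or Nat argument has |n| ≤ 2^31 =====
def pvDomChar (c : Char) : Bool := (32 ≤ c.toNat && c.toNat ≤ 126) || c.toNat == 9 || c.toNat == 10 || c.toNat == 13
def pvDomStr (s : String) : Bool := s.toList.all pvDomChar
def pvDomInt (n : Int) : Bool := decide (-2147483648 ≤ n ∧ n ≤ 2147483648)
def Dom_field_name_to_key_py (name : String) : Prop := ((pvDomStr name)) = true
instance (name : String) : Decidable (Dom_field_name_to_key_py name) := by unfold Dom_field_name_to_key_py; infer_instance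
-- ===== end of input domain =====

-- B replaces A's repeated find-and-slice paren-removal loop by a single buffered
-- left-to-right pass (objective: alternative; same results on every input).

-- ===== PORT A =====
-- A's 'while True' loop; each removal drops ≥ 2 chars, so key.length iterations always
-- suffice — the fuel parameter is only a structural totality guard, never reached.
def parenLoopA (fuel : Nat) (key : List Char) : List Char :=
  match fuel with
  | 0 => key
  | fuel + 1 =>
    let start := PySem.Chars.find key ['(']
    let stop := PySem.Chars.findFrom key [')'] (start + 1)
    if start ≠ -1 ∧ stop ≠ -1 then
      parenLoopA fuel (PySem.Chars.slice key none (some start) ++ PySem.Chars.slice key (some (stop + 1)) none)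
    else key

def field_name_to_key_py (name : String) : String :=
  let key := (PySem.Str.lower name).toList
  let key := parenLoopA key.length key
  let key := PySem.Chars.replace (PySem.Chars.replace key [' '] ['_']) ['-'] ['_']
  let key := PySem.Chars.stripChars (PySem.Chars.replace key ['_', '_'] ['_']) [' ', '_']
  String.ofList key

-- ===== PORT B =====
-- one step of B's single pass: output so far, plus an optional pending buffer opened at a paren
def scanStep (st : List Char × Option (List Char)) (ch : Char) : List Char × Option (List Char) :=
  match st with
  | (out, none) => if ch = '(' then (out, some [ch]) else (out ++ [ch], none)
  | (out, some b) => if ch = ')' then (out, none) else (out, some (b ++ [ch]))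

def field_name_to_key_py_alt (name : String) : String :=
  let st := (PySem.Str.lower name).toList.foldl scanStep ([], none)
  let key := st.1 ++ st.2.getD []
  let key := PySem.Chars.replace (PySem.Chars.replace key [' '] ['_']) ['-'] ['_']
  let key := PySem.Chars.stripChars (PySem.Chars.replace key ['_', '_'] ['_']) [' ', '_']
  String.ofList key

-- ===== PRECONDITION & SPEC =====
def Spec_field_name_to_key_py (name : String) (out : String) : Prop := out = field_name_to_key_py_alt name
instance (name : String) (out : String) : Decidable (Spec_field_name_to_key_py name out) := by unfold Spec_field_name_to_key_py; infer_instance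

-- ===== CLAIM (what is proved, stated in full; the proofs are below) =====
def Claim_equal_field_name_to_key_py : Prop := ∀ (name : String), Dom_field_name_to_key_py name → Spec_field_name_to_key_py name (field_name_to_key_py name)

-- ===== LEMMAS AND PROOFS =====

theorem foldl_scan_no_open (l : List Char) (out : List Char) (h : '(' ∉ l) :
    l.foldl scanStep (out, none) = (out ++ l, none) := by
  induction l generalizing out with
  | nil => simp
  | cons c l ih =>
    have hc : c ≠ '(' := by intro hc; exact h (by simp [hc])
    simp only [List.foldl_cons, scanStep, if_neg hc]
    rw [ih (out ++ [c]) (by intro hm; exact h (by simp [hm]))]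
    simp

theorem foldl_scan_no_close (l : List Char) (out b : List Char) (h : ')' ∉ l) :
    l.foldl scanStep (out, some b) = (out, some (b ++ l)) := by
  induction l generalizing b with
  | nil => simp
  | cons c l ih =>
    have hc : c ≠ ')' := by intro hc; exact h (by simp [hc])
    simp only [List.foldl_cons, scanStep, if_neg hc]
    rw [ih (b ++ [c]) (by intro hm; exact h (by simp [hm]))]
    simp

theorem singleton_infix_of_mem {c : Char} {l : List Char} (h : c ∈ l) : [c] <:+: l := by
  obtain ⟨s, t, rfl⟩ := List.mem_iff_append.mp h
  exact ⟨s, t, by simp⟩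

theorem not_mem_take_of_min (l : List Char) (c : Char) (n : Nat)
    (hmin : ∀ i < n, ¬ [c] <+: l.drop i) : c ∉ l.take n := by
  intro hmem
  obtain ⟨i, hi, hget⟩ := List.getElem_of_mem hmem
  have hi' : i < n := by simp [List.length_take] at hi; omega
  have hil : i < l.length := by simp [List.length_take] at hi; omega
  apply hmin i hi'
  rw [List.drop_eq_getElem_cons hil]
  have hgl : l[i] = c := by rw [← List.getElem_take (h := hi)]; exact hget
  exact ⟨l.drop (i + 1), by simp [hgl]⟩

def scanRes (l : List Char) : List Char :=
  (l.foldl scanStep ([], none)).1 ++ (l.foldl scanStep ([], none)).2.getD []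

theorem loop_eq_scan : ∀ (n : Nat) (l : List Char), l.length ≤ n → parenLoopA n l = scanRes l := by
  intro n
  induction n with
  | zero =>
    intro l hl
    have hnil : l = [] := by cases l <;> simp_all
    subst hnil
    unfold scanRes
    simp [parenLoopA]
  | succ n ih =>
    intro l hl
    by_cases hs : PySem.Chars.find l ['('] = -1
    · -- no opening paren at all: A's loop exits at once, B keeps everything
      have hnm : '(' ∉ l := fun hm =>
        ((PySem.Chars.find_eq_neg_one_iff l ['(']).mp hs) (singleton_infix_of_mem hm)
      rw [parenLoopA]
      rw [if_neg (fun hcon => hcon.1 hs)]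
      unfold scanRes
      rw [foldl_scan_no_open l [] hnm]
      simp
    · have hs0 : 0 ≤ PySem.Chars.find l ['('] := by
        have := PySem.Chars.neg_one_le_find l ['(']; omega
      obtain ⟨hpre, hmin⟩ := PySem.Chars.find_spec (s := l) (sub := ['(']) hs0
      set sn := (PySem.Chars.find l ['(']).toNat with hsn_def
      obtain ⟨t, ht⟩ := hpre
      have hdrop : l.drop sn = '(' :: t := by simpa using ht.symm
      have hsnlen : sn < l.length := by
        have h3 : (l.drop sn).length = l.length - sn := List.length_drop ..
        rw [hdrop] at h3; simp at h3; omega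
      have ht' : l.drop (sn + 1) = t := by
        have h4 : l.drop (sn + 1) = (l.drop sn).drop 1 := by rw [List.drop_drop]
        rw [h4, hdrop]; simp
      have hp : '(' ∉ l.take sn := not_mem_take_of_min l '(' sn hmin
      have hsplit : l = l.take sn ++ '(' :: t := by
        conv_lhs => rw [← List.take_append_drop sn l]
        rw [hdrop]
      have hk : sn + 1 ≤ l.length := by omega
      have hcast : PySem.Chars.find l ['('] + 1 = ((sn + 1 : Nat) : Int) := by omega
      have hff := PySem.Chars.findFrom_natCast l [')'] (sn + 1) hk
      by_cases hm : PySem.Chars.find (l.drop (sn + 1)) [')'] = -1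
      · -- an opener found but no closer after it: A exits; B flushes the still-open buffer
        have hstop : PySem.Chars.findFrom l [')'] (PySem.Chars.find l ['('] + 1) = -1 := by
          rw [hcast, hff, if_pos hm]
        have hnc : ')' ∉ t := by
          rw [← ht']
          exact fun hmem =>
            ((PySem.Chars.find_eq_neg_one_iff _ [')']).mp hm) (singleton_infix_of_mem hmem)
        rw [parenLoopA]
        rw [if_neg (fun hcon => hcon.2 hstop)]
        have hY : (l.take sn ++ '(' :: t).foldl scanStep ([], none) = (l.take sn, some ('(' :: t)) := by
          rw [List.foldl_append, foldl_scan_no_open _ [] hp]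
          simp only [List.nil_append, List.foldl_cons,
            show ∀ o : List Char, scanStep (o, none) '(' = (o, some ['(']) from fun _ => rfl]
          rw [foldl_scan_no_close t _ _ hnc]
          simp
        unfold scanRes
        conv_rhs => rw [hsplit]
        rw [hY]
        conv_lhs => rw [hsplit]
        simp
      · -- a complete group: A removes it and loops; B discards the buffer at the closer
        have hm0 : 0 ≤ PySem.Chars.find (l.drop (sn + 1)) [')'] := by
          have := PySem.Chars.neg_one_le_find (l.drop (sn + 1)) [')']; omega
        obtain ⟨hpre2, hmin2⟩ := PySem.Chars.find_spec (s := l.drop (sn + 1)) (sub := [')']) hm0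
        set mn := (PySem.Chars.find (l.drop (sn + 1)) [')']).toNat with hmn_def
        obtain ⟨v, hv⟩ := hpre2
        have hdrop2 : t.drop mn = ')' :: v := by rw [← ht']; simpa using hv.symm
        have hmnlen : mn < t.length := by
          have h3 : (t.drop mn).length = t.length - mn := List.length_drop ..
          rw [hdrop2] at h3; simp at h3; omega
        have hv' : t.drop (mn + 1) = v := by
          have h4 : t.drop (mn + 1) = (t.drop mn).drop 1 := by rw [List.drop_drop]
          rw [h4, hdrop2]; simp
        have hu : ')' ∉ t.take mn := by
          have h5 := not_mem_take_of_min (l.drop (sn + 1)) ')' mn hmin2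
          rwa [ht'] at h5
        have htsplit : t = t.take mn ++ ')' :: v := by
          conv_lhs => rw [← List.take_append_drop mn t]
          rw [hdrop2]
        have hstop : PySem.Chars.findFrom l [')'] (PySem.Chars.find l ['('] + 1)
            = ((sn + 1 + mn : Nat) : Int) := by
          rw [hcast, hff, if_neg hm]
          omega
        have hstopnat : (PySem.Chars.findFrom l [')'] (PySem.Chars.find l ['('] + 1) + 1).toNat
            = sn + 1 + mn + 1 := by rw [hstop]; omega
        -- the argument of A's recursive call is: prefix before the opener ++ suffix after the closer
        have harg : PySem.Chars.slice l none (some (PySem.Chars.find l ['('])) ++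
            PySem.Chars.slice l (some (PySem.Chars.findFrom l [')'] (PySem.Chars.find l ['('] + 1) + 1)) none
            = l.take sn ++ v := by
          rw [PySem.Chars.slice_eq_listSlice, PySem.Chars.slice_eq_listSlice,
              PySem.List.slice_to l hs0,
              PySem.List.slice_from l (show (0 : Int) ≤ _ + 1 by rw [hstop]; omega)]
          congr 1
          rw [hstopnat, show sn + 1 + mn + 1 = (sn + 1) + (mn + 1) by omega, ← List.drop_drop,
            ht', hv']
        have hlen : (l.take sn ++ v).length ≤ n := by
          have hvlen : v.length = t.length - (mn + 1) := by rw [← hv', List.length_drop]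
          have htlen : t.length = l.length - (sn + 1) := by rw [← ht', List.length_drop]
          simp only [List.length_append, List.length_take]
          omega
        have hfull : l = l.take sn ++ '(' :: (t.take mn ++ ')' :: v) := by
          rw [← htsplit]; exact hsplit
        have hX : (l.take sn ++ v).foldl scanStep ([], none)
            = v.foldl scanStep ((l.take sn, none) : List Char × Option (List Char)) := by
          rw [List.foldl_append, foldl_scan_no_open _ [] hp]
          simp
        have hY : (l.take sn ++ '(' :: (t.take mn ++ ')' :: v)).foldl scanStep ([], none)
            = v.foldl scanStep ((l.take sn, none) : List Char × Option (List Char)) := by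
          rw [List.foldl_append, foldl_scan_no_open _ [] hp]
          simp only [List.nil_append, List.foldl_cons,
            show ∀ o : List Char, scanStep (o, none) '(' = (o, some ['(']) from fun _ => rfl]
          rw [List.foldl_append, foldl_scan_no_close _ _ _ hu]
          simp only [List.foldl_cons,
            show ∀ (o b' : List Char), scanStep (o, some b') ')' = (o, none) from fun _ _ => rfl]
        rw [parenLoopA]
        rw [if_pos ⟨hs, show _ ≠ (-1 : Int) by rw [hstop]; omega⟩, harg, ih _ hlen]
        unfold scanRes
        conv_rhs => rw [hfull]
        rw [hX, hY]

-- ===== VERDICT (by name: the statement is the Claim_ definition above) =====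
theorem field_name_to_key_py_spec : Claim_equal_field_name_to_key_py := by
  intro name _
  unfold Spec_field_name_to_key_py
  simp only [field_name_to_key_py, field_name_to_key_py_alt]
  rw [loop_eq_scan (PySem.Str.lower name).toList.length _ le_rfl]
  rfl
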